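-- pv_equiv track=rewrite | github.com/danieleschmidt/holo-code-gen | holo_code_gen/quantum_ml_enhancement.py | _count_photonic_gates
-- ===== SOURCE A (Python) =====
-- from typing import Dict, List, Any, Optional, Tuple, Union
--
-- def _count_photonic_gates(encoding_layers: List[Dict[str, Any]]) -> Dict[str, int]:
--     """Count photonic gate types in the feature map."""
--     gate_counts = {
--         'single_qubit': 0,
--         'two_qubit': 0,
--         'parametric': 0,
--         'measurement': 0
--     }
--
--     for layer in encoding_layers:
--         for operation in layer['operations']:
--             if 'target' in operation and 'control' not in operation:
--                 gate_counts['single_qubit'] += 1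
--             elif 'control' in operation:
--                 gate_counts['two_qubit'] += 1
--
--             if 'parameter' in operation:
--                 gate_counts['parametric'] += 1
--
--     return gate_counts
-- ===== SOURCE B (Python) =====
-- def _count_photonic_gates(encoding_layers):
--     """Count photonic gate types in the feature map."""
--     ops = [op for layer in encoding_layers for op in layer['operations']]
--     return {
--         'single_qubit': sum(1 for op in ops if 'target' in op and 'control' not in op),
--         'two_qubit': sum(1 for op in ops if 'control' in op),
--         'parametric': sum(1 for op in ops if 'parameter' in op),
--         'measurement': 0,
--     }
-- ===== Notes on version B (the rewrite author's own statement) =====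
-- stated objective: simpler
-- what changed: Replaces the single mutating pass that branches per operation with a flatten of all operations followed by four independent field counts; the returned dict is built directly from these counts.
import Mathlib
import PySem

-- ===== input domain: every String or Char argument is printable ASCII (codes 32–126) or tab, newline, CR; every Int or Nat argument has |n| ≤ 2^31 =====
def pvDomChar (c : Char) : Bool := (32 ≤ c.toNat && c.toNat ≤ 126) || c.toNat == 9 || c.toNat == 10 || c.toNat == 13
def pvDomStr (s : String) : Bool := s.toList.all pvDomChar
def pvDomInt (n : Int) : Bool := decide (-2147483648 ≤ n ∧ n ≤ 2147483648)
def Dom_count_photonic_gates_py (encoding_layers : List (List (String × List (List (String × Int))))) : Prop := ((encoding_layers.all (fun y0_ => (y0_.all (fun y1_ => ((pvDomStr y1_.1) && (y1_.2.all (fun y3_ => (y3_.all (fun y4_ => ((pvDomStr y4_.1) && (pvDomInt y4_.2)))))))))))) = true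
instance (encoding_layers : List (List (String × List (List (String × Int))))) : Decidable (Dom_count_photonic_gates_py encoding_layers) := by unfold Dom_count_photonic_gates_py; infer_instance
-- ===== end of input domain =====

-- B flattens all operations once and builds the dict from four independent field counts
-- instead of A's single branching pass that mutates a counter dict; same cost, simpler.

-- ===== PORT A =====
def cpgStep (gc : PySem.Dict String Int) (op : List (String × Int)) : PySem.Dict String Int :=
  let d := PySem.Dict.mk op
  let gc :=
    if d.contains "target" && !d.contains "control" then gc.modify "single_qubit" 0 (· + 1)
    else if d.contains "control" then gc.modify "two_qubit" 0 (· + 1)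
    else gc
  if d.contains "parameter" then gc.modify "parametric" 0 (· + 1) else gc

def count_photonic_gates_py (encoding_layers : List (List (String × List (List (String × Int))))) : List (String × Int) :=
  let gate_counts : PySem.Dict String Int :=
    PySem.Dict.mk [("single_qubit", 0), ("two_qubit", 0), ("parametric", 0), ("measurement", 0)]
  -- layer['operations'] raises KeyError when the key is missing: Pre_ excludes that, default [] unreachable
  (encoding_layers.foldl (fun gc layer =>
    ((PySem.Dict.mk layer).getD "operations" []).foldl cpgStep gc) gate_counts).items

-- ===== PORT B =====
def count_photonic_gates_py_alt (encoding_layers : List (List (String × List (List (String × Int))))) : List (String × Int) :=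
  let ops := encoding_layers.flatMap (fun layer => (PySem.Dict.mk layer).getD "operations" [])
  [("single_qubit", (ops.countP (fun op => (PySem.Dict.mk op).contains "target" && !(PySem.Dict.mk op).contains "control") : Int)),
   ("two_qubit", (ops.countP (fun op => (PySem.Dict.mk op).contains "control") : Int)),
   ("parametric", (ops.countP (fun op => (PySem.Dict.mk op).contains "parameter") : Int)),
   ("measurement", 0)]

-- ===== PRECONDITION & SPEC =====
-- Pre_ excludes exactly the inputs where layer['operations'] raises KeyError (a layer without that key).
def Pre_count_photonic_gates_py (encoding_layers : List (List (String × List (List (String × Int))))) : Prop :=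
  encoding_layers.all (fun layer => (PySem.Dict.mk layer).contains "operations") = true
instance (encoding_layers : List (List (String × List (List (String × Int))))) : Decidable (Pre_count_photonic_gates_py encoding_layers) := by unfold Pre_count_photonic_gates_py; infer_instance
def pvWitness_count_photonic_gates_py : (List (List (String × List (List (String × Int))))) :=
  [[("operations", [[("target", 0)], [("control", 1), ("parameter", 2)]])]]

def Spec_count_photonic_gates_py (encoding_layers : List (List (String × List (List (String × Int))))) (out : List (String × Int)) : Prop := out = count_photonic_gates_py_alt encoding_layers
instance (encoding_layers : List (List (String × List (List (String × Int))))) (out : List (String × Int)) : Decidable (Spec_count_photonic_gates_py encoding_layers out) := by unfold Spec_count_photonic_gates_py; infer_instance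

-- ===== CLAIM (what is proved, stated in full; the proofs are below) =====
def Claim_equal_count_photonic_gates_py : Prop := ∀ (encoding_layers : List (List (String × List (List (String × Int))))), Dom_count_photonic_gates_py encoding_layers → Pre_count_photonic_gates_py encoding_layers → Spec_count_photonic_gates_py encoding_layers (count_photonic_gates_py encoding_layers)

-- ===== LEMMAS AND PROOFS =====
def cpgP1 (op : List (String × Int)) : Bool :=
  (PySem.Dict.mk op).contains "target" && !(PySem.Dict.mk op).contains "control"
def cpgP2 (op : List (String × Int)) : Bool := (PySem.Dict.mk op).contains "control"
def cpgP3 (op : List (String × Int)) : Bool := (PySem.Dict.mk op).contains "parameter"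

def cpgOps (layer : List (String × List (List (String × Int)))) : List (List (String × Int)) :=
  (PySem.Dict.mk layer).getD "operations" []

lemma cpg_step_eq (op : List (String × Int)) (s t p m : Int) :
    cpgStep (PySem.Dict.mk [("single_qubit", s), ("two_qubit", t), ("parametric", p), ("measurement", m)]) op
    = PySem.Dict.mk [("single_qubit", s + if cpgP1 op then 1 else 0),
        ("two_qubit", t + if cpgP2 op then 1 else 0),
        ("parametric", p + if cpgP3 op then 1 else 0), ("measurement", m)] := by
  unfold cpgStep cpgP1 cpgP2 cpgP3
  by_cases h1 : (PySem.Dict.mk op).contains "target" <;>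
  by_cases h2 : (PySem.Dict.mk op).contains "control" <;>
  by_cases h3 : (PySem.Dict.mk op).contains "parameter" <;>
    (simp only [PySem.Dict.contains] at h1 h2 h3;
     simp [h1, h2, h3, PySem.Dict.modify, PySem.Dict.insert, PySem.Dict.getD, PySem.Dict.get?,
       PySem.Dict.contains])

lemma cpg_arith (a : Int) (b : Bool) (n : Nat) :
    (a + if b then 1 else 0) + (n : Int) = a + (((n + if b then 1 else 0 : Nat)) : Int) := by
  split_ifs <;> push_cast <;> ring

lemma cpg_arith2 (a : Int) (n k : Nat) : (a + (n : Int)) + (k : Int) = a + ((n + k : Nat) : Int) := by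
  push_cast; ring

lemma cpg_inner (ops : List (List (String × Int))) (s t p m : Int) :
    ops.foldl cpgStep (PySem.Dict.mk [("single_qubit", s), ("two_qubit", t), ("parametric", p), ("measurement", m)])
    = PySem.Dict.mk [("single_qubit", s + ops.countP cpgP1), ("two_qubit", t + ops.countP cpgP2),
        ("parametric", p + ops.countP cpgP3), ("measurement", m)] := by
  induction ops generalizing s t p m with
  | nil => simp
  | cons op rest ih =>
    rw [List.foldl_cons, cpg_step_eq, ih]
    simp only [List.countP_cons, cpg_arith]

lemma cpg_outer (L : List (List (String × List (List (String × Int))))) (s t p m : Int) :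
    L.foldl (fun gc layer => (cpgOps layer).foldl cpgStep gc)
      (PySem.Dict.mk [("single_qubit", s), ("two_qubit", t), ("parametric", p), ("measurement", m)])
    = PySem.Dict.mk [("single_qubit", s + (L.flatMap cpgOps).countP cpgP1),
        ("two_qubit", t + (L.flatMap cpgOps).countP cpgP2),
        ("parametric", p + (L.flatMap cpgOps).countP cpgP3), ("measurement", m)] := by
  induction L generalizing s t p m with
  | nil => simp
  | cons layer rest ih =>
    rw [List.foldl_cons, cpg_inner, ih]
    simp only [List.flatMap_cons, List.countP_append, cpg_arith2]

theorem count_photonic_gates_py_spec : Claim_equal_count_photonic_gates_py := by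
  intro L _ _
  unfold Spec_count_photonic_gates_py count_photonic_gates_py count_photonic_gates_py_alt
  dsimp only
  rw [show (fun gc layer => List.foldl cpgStep gc ((PySem.Dict.mk layer).getD "operations" []))
      = (fun gc layer => (cpgOps layer).foldl cpgStep gc) from rfl, cpg_outer]
  simp only [zero_add]
  rfl
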